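-- pv_equiv track=rewrite | github.com/mcdaniel13/leetcode | karat_oa.py | solve
-- ===== SOURCE A (Python) =====
-- def solve(logs):
--     mp = dict()
--     for log in logs:
--         user = log[1]
--         val = log[0]
--         if user not in mp:
--             mp[user] = [int(val), int(val)]
--         else:
--             mp[user][0] = max(mp[user][0], int(val))
--             mp[user][1] = min(mp[user][1], int(val))
--     return list(mp.items())
-- ===== SOURCE B (Python) =====
-- def solve(logs):
--     groups = {}
--     for log in logs:
--         groups.setdefault(log[1], []).append(int(log[0]))
--     return [(user, [max(vals), min(vals)]) for user, vals in groups.items()]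
-- ===== Notes on version B (the rewrite author's own statement) =====
-- stated objective: idiomatic
-- what changed: B groups all values per user first (dict of lists via setdefault) and computes max/min once per user afterwards, instead of A's in-loop running max/min over a mutated two-element list.
import Mathlib
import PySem

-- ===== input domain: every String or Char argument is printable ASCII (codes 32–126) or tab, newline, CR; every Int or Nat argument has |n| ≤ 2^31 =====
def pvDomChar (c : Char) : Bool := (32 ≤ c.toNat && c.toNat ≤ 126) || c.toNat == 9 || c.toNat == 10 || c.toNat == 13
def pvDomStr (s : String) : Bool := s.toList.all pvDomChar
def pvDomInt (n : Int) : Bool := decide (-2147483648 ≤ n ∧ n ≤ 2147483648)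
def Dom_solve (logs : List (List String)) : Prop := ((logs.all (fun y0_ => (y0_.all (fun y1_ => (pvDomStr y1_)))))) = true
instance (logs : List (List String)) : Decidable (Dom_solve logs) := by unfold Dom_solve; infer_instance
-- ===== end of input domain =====

-- B groups values per user first, then takes max/min once per group; A keeps a running [max,min] pair.

-- ===== PORT A =====
-- loop body of A: running [max, min] two-element list per user (mp[user][0]/[1] mutation)
def solveStep (mp : PySem.Dict String (List Int)) (log : List String) : PySem.Dict String (List Int) :=
  let user := log.getD 1 ""
  let val : Int := (PySem.Int.ofStr? (log.getD 0 "")).getD 0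
  if mp.contains user = false then
    mp.insert user [val, val]
  else
    mp.modify user [] (fun l => [max (l.getD 0 0) val, min (l.getD 1 0) val])

def solve (logs : List (List String)) : List (String × List Int) :=
  (logs.foldl solveStep PySem.Dict.empty).items

-- ===== PORT B =====
-- loop body of B: groups.setdefault(log[1], []).append(int(log[0]))
def groupStep (d : PySem.Dict String (List Int)) (log : List String) : PySem.Dict String (List Int) :=
  d.modify (log.getD 1 "") [] (fun l => l ++ [(PySem.Int.ofStr? (log.getD 0 "")).getD 0])

-- the comprehension's element: (user, [max(vals), min(vals)])
def finalize (p : String × List Int) : String × List Int :=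
  (p.1, [(PySem.List.max? p.2 (fun x => x)).getD 0, (PySem.List.min? p.2 (fun x => x)).getD 0])

def solve_alt (logs : List (List String)) : List (String × List Int) :=
  ((logs.foldl groupStep PySem.Dict.empty).items).map finalize

-- ===== PRECONDITION & SPEC =====
-- Pre_ excludes exactly the inputs on which the Python A raises: a log with fewer than two
-- entries (IndexError) or whose first entry is not an int literal (ValueError).
def Pre_solve (logs : List (List String)) : Prop :=
  ∀ log ∈ logs, 2 ≤ log.length ∧ (PySem.Int.ofStr? (log.getD 0 "")).isSome = true
instance (logs : List (List String)) : Decidable (Pre_solve logs) := by unfold Pre_solve; infer_instance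

def pvWitness_solve : List (List String) := [["1", "alice"], ["3", "alice"], ["2", "bob"]]

def Spec_solve (logs : List (List String)) (out : List (String × List Int)) : Prop := out = solve_alt logs
instance (logs : List (List String)) (out : List (String × List Int)) : Decidable (Spec_solve logs out) := by unfold Spec_solve; infer_instance

-- ===== CLAIM (what is proved, stated in full; the proofs are below) =====
def Claim_equal_solve : Prop := ∀ (logs : List (List String)), Dom_solve logs → Pre_solve logs → Spec_solve logs (solve logs)

-- ===== LEMMAS AND PROOFS =====

-- keys of a finalize-mapped item list coincide with the original keys
lemma contains_map_finalize (l : List (String × List Int)) (u : String) :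
    (PySem.Dict.mk (l.map finalize)).contains u = (PySem.Dict.mk l).contains u := by
  induction l with
  | nil => rfl
  | cons p t ih =>
    simp only [List.map_cons, PySem.Dict.contains, List.any_cons] at *
    cases h : p.1 == u <;> simp [finalize, h, ih]

lemma getD_map_finalize (l : List (String × List Int)) (u : String)
    (hc : (PySem.Dict.mk l).contains u = true) :
    (PySem.Dict.mk (l.map finalize)).getD u [] =
      (finalize (u, (PySem.Dict.mk l).getD u [])).2 := by
  induction l with
  | nil => simp [PySem.Dict.contains] at hc
  | cons p t ih =>
    by_cases h : p.1 = u
    · simp [PySem.Dict.getD, PySem.Dict.get?, finalize, h]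
    · simp only [PySem.Dict.contains, List.any_cons] at hc
      have hc' : (PySem.Dict.mk t).contains u = true := by
        simpa [PySem.Dict.contains, h] using hc
      simpa [PySem.Dict.getD, PySem.Dict.get?, finalize, h] using ih hc' 

-- running max/min over an appended value = fold of max/min over the longer list
lemma finalize_append (vs : List Int) (v : Int) (h : vs ≠ []) :
    (finalize (u, vs ++ [v])).2 =
      [max ((finalize (u, vs)).2.getD 0 0) v, min ((finalize (u, vs)).2.getD 1 0) v] := by
  obtain ⟨x, t, rfl⟩ := List.exists_cons_of_ne_nil h
  simp [finalize, PySem.List.max?_id_cons, PySem.List.min?_id_cons, List.foldl_append]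

-- the one-step commutation: A's step on the finalized dict = finalize of B's step
lemma step_comm (g : PySem.Dict String (List Int)) (log : List String)
    (hne : ∀ p ∈ g.items, p.2 ≠ []) :
    solveStep (PySem.Dict.mk (g.items.map finalize)) log =
      PySem.Dict.mk ((groupStep g log).items.map finalize) := by
  set u := log.getD 1 "" with hu
  set v : Int := (PySem.Int.ofStr? (log.getD 0 "")).getD 0 with hv
  by_cases hc : g.contains u = true
  · -- user already present: both sides replace the first-match value in place
    obtain ⟨w, hw⟩ : ∃ w, g.get? u = some w := by
      cases h : g.get? u with
      | none => rw [PySem.Dict.get?_eq_none_iff_contains] at h; simp [hc] at h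
      | some w => exact ⟨w, rfl⟩
    have hwmem : (u, w) ∈ g.items := PySem.Dict.mem_items_of_get?_eq_some _ hw
    have hwne : w ≠ [] := hne _ hwmem
    have hgd : g.getD u [] = w := PySem.Dict.getD_of_get?_eq_some _ _ hw
    have hc' : (PySem.Dict.mk (g.items.map finalize)).contains u = true := by
      rw [contains_map_finalize]; exact hc
    have hgd' := getD_map_finalize g.items u hc
    simp only [solveStep, groupStep, PySem.Dict.modify, ← hu, ← hv, hc', Bool.true_eq_false,
      if_false, PySem.Dict.insert, hc, if_true, hgd', hgd]
    congr 1
    simp only [List.map_map]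
    apply List.map_congr_left
    intro p hp
    by_cases hpu : p.1 == u
    · have hpe : p.1 = u := by simpa using hpu
      simp only [Function.comp, hpu, if_true]
      have := finalize_append (u := u) w v hwne
      simp [finalize] at this ⊢
      simp [hpe, this]
    · simp [Function.comp, hpu, finalize]
  · -- new user: both sides append at the end
    replace hc : g.contains u = false := by
      simp only [Bool.not_eq_true] at hc; exact hc
    have hc' : (PySem.Dict.mk (g.items.map finalize)).contains u = false := by
      rw [contains_map_finalize]; exact hc
    have hgd : g.getD u [] = [] := PySem.Dict.getD_of_not_contains _ _ hc
    simp only [solveStep, groupStep, PySem.Dict.modify, ← hu, ← hv, hc', hgd,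
      PySem.Dict.insert, hc, List.nil_append]
    simp [finalize, PySem.List.max?_id_cons, PySem.List.min?_id_cons]

lemma step_ne (g : PySem.Dict String (List Int)) (log : List String)
    (hne : ∀ p ∈ g.items, p.2 ≠ []) :
    ∀ p ∈ (groupStep g log).items, p.2 ≠ [] := by
  intro p hp
  simp only [groupStep, PySem.Dict.modify, PySem.Dict.insert] at hp
  split at hp
  · simp only [List.mem_map] at hp
    obtain ⟨q, hq, rfl⟩ := hp
    split
    · simp
    · exact hne q hq
  · simp only [List.mem_append, List.mem_singleton] at hp
    rcases hp with hp | rfl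
    · exact hne p hp
    · simp

lemma loop_eq (logs : List (List String)) :
    ∀ (g : PySem.Dict String (List Int)), (∀ p ∈ g.items, p.2 ≠ []) →
      (logs.foldl solveStep (PySem.Dict.mk (g.items.map finalize))).items =
        ((logs.foldl groupStep g).items).map finalize := by
  induction logs with
  | nil => intro g _; rfl
  | cons log rest ih =>
    intro g hne
    simp only [List.foldl_cons, step_comm g log hne]
    exact ih _ (step_ne g log hne)

-- ===== VERDICT (by name: the statement is the Claim_ definition above) =====
theorem solve_spec : Claim_equal_solve := by
  intro logs _ _
  show solve logs = solve_alt logs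
  have := loop_eq logs PySem.Dict.empty (by intro p hp; simp [PySem.Dict.empty] at hp)
  simpa [solve, solve_alt, PySem.Dict.empty] using this
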